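-- pv_equiv track=rewrite | github.com/shevchenkoxx/sphere-mvp-tg-bot | scripts/test_extraction.py | extract_chain_of_thought
-- ===== SOURCE A (Python) =====
-- def extract_chain_of_thought(response: str) -> str:
--     """Extract chain-of-thought steps from response (before JSON)."""
--     # Find where JSON section starts
--     json_markers = ['## JSON:', '## STEP 4 - JSON OUTPUT', '```json']
--
--     cot_end = len(response)
--     for marker in json_markers:
--         idx = response.lower().find(marker.lower())
--         if idx != -1 and idx < cot_end:
--             cot_end = idx
--
--     return response[:cot_end].strip()
-- ===== SOURCE B (Python) =====
-- def extract_chain_of_thought(response: str) -> str: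
--     """Extract chain-of-thought steps from response (before JSON)."""
--     markers = ('## json:', '## step 4 - json output', '```json')
--     low = response.lower()
--     for i in range(len(low)):
--         if low.startswith(markers, i):
--             return response[:i].strip()
--     return response.strip()
-- ===== Notes on version B (the rewrite author's own statement) =====
-- stated objective: alternative
-- what changed: A runs three separate full-string lower().find() searches and keeps a running minimum index; B makes one left-to-right scan over the lowered string and stops at the first position where any of the three markers begins (str.startswith with a tuple and start offset).
import Mathlib
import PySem

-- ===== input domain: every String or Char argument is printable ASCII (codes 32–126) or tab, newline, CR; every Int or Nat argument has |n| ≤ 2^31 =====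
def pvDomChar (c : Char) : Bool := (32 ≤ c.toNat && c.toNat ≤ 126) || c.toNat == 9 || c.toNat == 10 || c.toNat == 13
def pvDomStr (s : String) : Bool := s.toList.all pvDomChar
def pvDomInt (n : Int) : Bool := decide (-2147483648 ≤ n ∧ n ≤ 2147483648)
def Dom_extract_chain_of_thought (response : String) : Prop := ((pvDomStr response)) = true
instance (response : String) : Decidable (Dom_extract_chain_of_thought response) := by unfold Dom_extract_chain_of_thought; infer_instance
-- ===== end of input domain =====

-- B replaces A's three full-string lower().find() passes + running minimum by a single
-- left-to-right scan that stops at the first position where any lowered marker begins (alternative decomposition, not claimed faster).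

-- ===== PORT A =====
def extract_chain_of_thought (response : String) : String :=
  let jsonMarkers : List String := ["## JSON:", "## STEP 4 - JSON OUTPUT", "```json"]
  let cotEnd : Int := jsonMarkers.foldl (fun cotEnd marker =>
    let idx := PySem.Chars.find (PySem.Chars.lower response.toList) (PySem.Chars.lower marker.toList)
    if idx ≠ -1 ∧ idx < cotEnd then idx else cotEnd) (PySem.Chars.len response.toList)
  String.ofList (PySem.Chars.strip (PySem.Chars.slice response.toList none (some cotEnd)))

-- ===== PORT B =====
-- low.startswith(markers, i) : does any of the three lowered markers start at this suffix?
def pvHit (s : List Char) : Bool :=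
  PySem.Chars.startswith s "## json:".toList ||
  PySem.Chars.startswith s "## step 4 - json output".toList ||
  PySem.Chars.startswith s "```json".toList

-- the 'for i in range(len(low))' loop: walk the suffixes of low, counting the position i
def pvScan (resp : List Char) (low : List Char) (i : Nat) : String :=
  match low with
  | [] => String.ofList (PySem.Chars.strip resp)
  | c :: t =>
    if pvHit (c :: t) then
      String.ofList (PySem.Chars.strip (PySem.Chars.slice resp none (some (i : Int))))
    else pvScan resp t (i + 1)

def extract_chain_of_thought_alt (response : String) : String :=
  pvScan response.toList (PySem.Chars.lower response.toList) 0

-- ===== PRECONDITION & SPEC =====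
def Spec_extract_chain_of_thought (response : String) (out : String) : Prop := out = extract_chain_of_thought_alt response
instance (response : String) (out : String) : Decidable (Spec_extract_chain_of_thought response out) := by unfold Spec_extract_chain_of_thought; infer_instance

-- ===== CLAIM (what is proved, stated in full; the proofs are below) =====
def Claim_equal_extract_chain_of_thought : Prop := ∀ (response : String), Dom_extract_chain_of_thought response → Spec_extract_chain_of_thought response (extract_chain_of_thought response)

-- ===== LEMMAS AND PROOFS =====

theorem pvHit_iff (s : List Char) : pvHit s = true ↔
    ("## json:".toList <+: s ∨ "## step 4 - json output".toList <+: s ∨ "```json".toList <+: s) := by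
  simp [pvHit, PySem.Chars.startswith_iff, Bool.or_eq_true, or_assoc]

theorem pvScan_no_hit (resp : List Char) :
    ∀ (t : List Char) (i : Nat), (∀ j, pvHit (t.drop j) = false) →
      pvScan resp t i = String.ofList (PySem.Chars.strip resp) := by
  intro t
  induction t with
  | nil => intro i _; rfl
  | cons c t ih =>
    intro i h
    have h0 : pvHit (c :: t) = false := h 0
    rw [pvScan, h0]
    simp only [Bool.false_eq_true, if_false]
    exact ih (i + 1) (fun j => h (j + 1))

theorem pvScan_hit (resp : List Char) :
    ∀ (t : List Char) (k i : Nat), pvHit (t.drop k) = true →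
      (∀ j, j < k → pvHit (t.drop j) = false) →
      pvScan resp t i =
        String.ofList (PySem.Chars.strip (PySem.Chars.slice resp none (some ((i + k : Nat) : Int)))) := by
  intro t
  induction t with
  | nil =>
    intro k i h1 _
    rw [List.drop_nil] at h1
    exact absurd h1 (by decide)
  | cons c t ih =>
    intro k i h1 h2
    cases k with
    | zero =>
      rw [pvScan, if_pos (by simpa using h1)]
      simp
    | succ k =>
      have h0 : pvHit (c :: t) = false := by simpa using h2 0 (Nat.succ_pos k)
      rw [pvScan, h0]
      simp only [Bool.false_eq_true, if_false]
      rw [show i + (k + 1) = (i + 1) + k from by omega]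
      exact ih k (i + 1) (by simpa using h1) (fun j hj => h2 (j + 1) (by omega))

-- the core: if e is a lower bound on all hit positions and either e = len(s) or there is a hit at e,
-- then slicing s at e and stripping is what the scan returns
theorem pv_cut_spec (s low : List Char) (hlen : low.length = s.length) (e : Int)
    (h0 : 0 ≤ e)
    (hhit : e = (s.length : Int) ∨ pvHit (low.drop e.toNat) = true)
    (hmin : ∀ j, j < e.toNat → pvHit (low.drop j) = false) :
    String.ofList (PySem.Chars.strip (PySem.Chars.slice s none (some e))) = pvScan s low 0 := by
  rcases hhit with he | hh
  · -- no marker occurs: scan runs off the end, slice keeps everything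
    have hall : ∀ j, pvHit (low.drop j) = false := by
      intro j
      by_cases hj : j < e.toNat
      · exact hmin j hj
      · have : low.drop j = [] := by
          apply List.drop_eq_nil_of_le
          omega
        rw [this]; rfl
    rw [pvScan_no_hit s low 0 hall]
    rw [PySem.Chars.slice, PySem.List.slice_to _ h0, he]
    simp
  · rw [pvScan_hit s low e.toNat 0 hh hmin,
      show ((0 + e.toNat : Nat) : Int) = e from by omega]

theorem extract_eq (response : String) :
    extract_chain_of_thought response = extract_chain_of_thought_alt response := by
  unfold extract_chain_of_thought extract_chain_of_thought_alt
  have hm1 : PySem.Chars.lower "## JSON:".toList = "## json:".toList := by decide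
  have hm2 : PySem.Chars.lower "## STEP 4 - JSON OUTPUT".toList = "## step 4 - json output".toList := by decide
  have hm3 : PySem.Chars.lower "```json".toList = "```json".toList := by decide
  simp only [List.foldl, hm1, hm2, hm3, PySem.Chars.len]
  set s := response.toList with hs
  set low := PySem.Chars.lower s with hlow
  have hlen : low.length = s.length := by simp [hlow, PySem.Chars.lower]
  set f1 := PySem.Chars.find low "## json:".toList with hf1
  set f2 := PySem.Chars.find low "## step 4 - json output".toList with hf2
  set f3 := PySem.Chars.find low "```json".toList with hf3
  have hb1 : -1 ≤ f1 := PySem.Chars.neg_one_le_find low _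
  have hb2 : -1 ≤ f2 := PySem.Chars.neg_one_le_find low _
  have hb3 : -1 ≤ f3 := PySem.Chars.neg_one_le_find low _
  -- a hit exists wherever a find succeeded
  have hp1 : 0 ≤ f1 → pvHit (low.drop f1.toNat) = true := fun h =>
    (pvHit_iff _).2 (Or.inl (PySem.Chars.find_spec h).1)
  have hp2 : 0 ≤ f2 → pvHit (low.drop f2.toNat) = true := fun h =>
    (pvHit_iff _).2 (Or.inr (Or.inl (PySem.Chars.find_spec h).1))
  have hp3 : 0 ≤ f3 → pvHit (low.drop f3.toNat) = true := fun h =>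
    (pvHit_iff _).2 (Or.inr (Or.inr (PySem.Chars.find_spec h).1))
  -- a marker prefix at j forces its find to be ≤ j
  have hq : ∀ (m : List Char) (j : Nat), m <+: low.drop j →
      0 ≤ PySem.Chars.find low m ∧ (PySem.Chars.find low m).toNat ≤ j := by
    intro m j hj
    have hnn : 0 ≤ PySem.Chars.find low m := by
      rw [PySem.Chars.find_nonneg_iff]
      rw [← PySem.Chars.isIn_iff_infix, ← PySem.Chars.exists_prefix_drop_iff_isIn]
      exact ⟨j, hj⟩
    refine ⟨hnn, ?_⟩
    by_contra hlt
    exact (PySem.Chars.find_spec hnn).2 j (by omega) hj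
  have hmin_gen : ∀ (E : Int), (0 ≤ f1 → E ≤ f1) → (0 ≤ f2 → E ≤ f2) → (0 ≤ f3 → E ≤ f3) →
      ∀ j, j < E.toNat → pvHit (low.drop j) = false := by
    intro E hE1 hE2 hE3 j hj
    by_contra hcon
    have hhit : pvHit (low.drop j) = true := by
      cases h : pvHit (low.drop j) with
      | true => rfl
      | false => exact absurd h hcon
    rcases (pvHit_iff _).1 hhit with h | h | h
    · rcases hq _ j h with ⟨ha, hb⟩; rw [← hf1] at ha hb; have := hE1 ha; omega
    · rcases hq _ j h with ⟨ha, hb⟩; rw [← hf2] at ha hb; have := hE2 ha; omega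
    · rcases hq _ j h with ⟨ha, hb⟩; rw [← hf3] at ha hb; have := hE3 ha; omega
  split_ifs with c1 c2 c3 <;>
    apply pv_cut_spec s low hlen <;>
    first
      | omega
      | (exact Or.inr (hp1 (by omega)))
      | (exact Or.inr (hp2 (by omega)))
      | (exact Or.inr (hp3 (by omega)))
      | (exact Or.inl rfl)
      | (exact hmin_gen _ (fun h => by omega) (fun h => by omega) (fun h => by omega))

-- ===== VERDICT (by name: the statement is the Claim_ definition above) =====
theorem extract_chain_of_thought_spec : Claim_equal_extract_chain_of_thought := by
  intro response _
  exact extract_eq response
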